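-- pv_equiv track=rewrite | github.com/mplazaf/tarea1-remake | juez.py | makeEstrofas
-- ===== SOURCE A (Python) =====
-- def makeEstrofas(listaVersos):
--     cont = 1
--     listaEstrofas = []
--     estrofaActual = []
--     while cont < len(listaVersos):
--         estrofaActual.append(listaVersos[cont])
--         if (cont)%4 == 0:
--             listaEstrofas.append(estrofaActual)
--             estrofaActual = []
--         cont += 1
--     return listaEstrofas
-- ===== SOURCE B (Python) =====
-- def makeEstrofas(listaVersos):
--     tail = listaVersos[1:]
--     return [tail[4*k:4*k+4] for k in range(len(tail)//4)]
-- ===== Notes on version B (the rewrite author's own statement) =====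
-- stated objective: simpler
-- what changed: B slices off the first verse once and builds the result as a comprehension of whole four-element slices over stanza indices (len(tail)//4 complete groups), replacing A's element-by-element while loop with a modular flush counter and mutable accumulators.
import Mathlib
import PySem

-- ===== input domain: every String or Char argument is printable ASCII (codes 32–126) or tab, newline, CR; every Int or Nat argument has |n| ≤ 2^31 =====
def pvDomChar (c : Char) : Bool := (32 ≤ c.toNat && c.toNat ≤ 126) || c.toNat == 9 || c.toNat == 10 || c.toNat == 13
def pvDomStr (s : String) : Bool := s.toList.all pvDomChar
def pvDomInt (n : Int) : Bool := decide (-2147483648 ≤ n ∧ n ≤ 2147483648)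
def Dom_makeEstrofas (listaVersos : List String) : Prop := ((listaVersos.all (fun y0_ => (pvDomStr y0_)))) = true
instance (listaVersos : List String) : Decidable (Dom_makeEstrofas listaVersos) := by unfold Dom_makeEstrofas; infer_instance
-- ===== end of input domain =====

-- B replaces A's element-by-element loop with a modular flush counter by slicing off
-- the first verse once and chunking the rest with whole slices of four (simpler decomposition).

-- ===== PORT A =====
-- A's while loop: cont counts from 1; each step appends listaVersos[cont] to the current
-- stanza and flushes it when cont % 4 == 0.  cont is a Nat (starts at 1, only incremented).
def makeEstrofasLoopA (xs : List String) (cont : Nat)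
    (listaEstrofas : List (List String)) (estrofaActual : List String) :
    List (List String) :=
  if cont < xs.length then
    match PySem.List.pyGet? xs (cont : Int) with
    | none => listaEstrofas  -- unreachable: cont < len xs
    | some v =>
      let estrofaActual' := estrofaActual ++ [v]
      if cont % 4 == 0 then
        makeEstrofasLoopA xs (cont + 1) (listaEstrofas ++ [estrofaActual']) []
      else
        makeEstrofasLoopA xs (cont + 1) listaEstrofas estrofaActual'
  else listaEstrofas
termination_by xs.length - cont

def makeEstrofas (listaVersos : List String) : List (List String) :=
  makeEstrofasLoopA listaVersos 1 [] []

-- ===== PORT B =====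
-- B: tail = listaVersos[1:]; [tail[4*k:4*k+4] for k in range(len(tail)//4)]
def makeEstrofas_alt (listaVersos : List String) : List (List String) :=
  let tail := PySem.List.slice listaVersos (some 1) none
  (PySem.List.pyRange 0 (PySem.Int.floordiv (tail.length : Int) 4) 1).map
    (fun k => PySem.List.slice tail (some (4 * k)) (some (4 * k + 4)))

-- ===== PRECONDITION & SPEC =====
def Spec_makeEstrofas (listaVersos : List String) (out : List (List String)) : Prop := out = makeEstrofas_alt listaVersos
instance (listaVersos : List String) (out : List (List String)) : Decidable (Spec_makeEstrofas listaVersos out) := by unfold Spec_makeEstrofas; infer_instance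

-- ===== CLAIM (what is proved, stated in full; the proofs are below) =====
def Claim_equal_makeEstrofas : Prop := ∀ (listaVersos : List String), Dom_makeEstrofas listaVersos → Spec_makeEstrofas listaVersos (makeEstrofas listaVersos)

-- ===== LEMMAS AND PROOFS =====

-- common characterisation: greedy chunks of four
def chunk4 : List String → List (List String)
  | a :: b :: c :: d :: rest => [a, b, c, d] :: chunk4 rest
  | _ => []

-- A's loop, abstracted over the still-unprocessed suffix; r = cont % 4
def loopAbs (r : Nat) (cur : List String) : List String → List (List String)
  | [] => []
  | v :: rest =>
    if r == 0 then (cur ++ [v]) :: loopAbs 1 [] rest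
    else loopAbs ((r + 1) % 4) (cur ++ [v]) rest

theorem loopA_eq_loopAbs (xs : List String) (n cont : Nat) (hn : xs.length - cont ≤ n)
    (est : List (List String)) (cur : List String) :
    makeEstrofasLoopA xs cont est cur = est ++ loopAbs (cont % 4) cur (xs.drop cont) := by
  induction n generalizing cont est cur with
  | zero =>
    have h : ¬ cont < xs.length := by omega
    rw [makeEstrofasLoopA]
    simp [h, List.drop_eq_nil_of_le (by omega : xs.length ≤ cont), loopAbs]
  | succ n ih =>
    rw [makeEstrofasLoopA]
    by_cases h : cont < xs.length
    · have hget : PySem.List.pyGet? xs (cont : Int) = some xs[cont] := by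
        simp [PySem.List.pyGet?_natCast, List.getElem?_eq_getElem h]
      have hdrop : xs.drop cont = xs[cont] :: xs.drop (cont + 1) :=
        List.drop_eq_getElem_cons h
      rw [hdrop]
      simp only [h, if_pos, hget, loopAbs]
      by_cases hr : cont % 4 = 0
      · have h1 : (cont + 1) % 4 = 1 := by omega
        have hc : (cont % 4 == 0) = true := by simp [hr]
        rw [if_pos hc, if_pos hc, ih (cont + 1) (by omega), h1]
        simp
      · have h1 : (cont + 1) % 4 = (cont % 4 + 1) % 4 := by omega
        have hc : ¬ ((cont % 4 == 0) = true) := by simp [hr]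
        rw [if_neg hc, if_neg hc, ih (cont + 1) (by omega), h1]
    · simp [h, List.drop_eq_nil_of_le (by omega : xs.length ≤ cont), loopAbs]

theorem loopAbs_one_eq_chunk4 (l : List String) : loopAbs 1 [] l = chunk4 l := by
  induction l using chunk4.induct with
  | case1 a b c d rest ih =>
    simp [loopAbs, chunk4, ih]
  | case2 l h =>
    -- fewer than four elements: both sides are []
    match l, h with
    | [], _ => simp [loopAbs, chunk4]
    | [a], _ => simp [loopAbs, chunk4]
    | [a, b], _ => simp [loopAbs, chunk4]
    | [a, b, c], _ => simp [loopAbs, chunk4]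
    | a :: b :: c :: d :: r, h => exact (h a b c d r rfl).elim

theorem mapRange_eq_chunk4 (full : List String) :
    ∀ (l : List String) (j : Nat), l = full.drop (4 * j) →
    ((PySem.List.pyRange (j : Int) ((j : Int) + ((l.length / 4 : Nat) : Int)) 1).map
       (fun k => PySem.List.slice full (some (4 * k)) (some (4 * k + 4)))) = chunk4 l := by
  intro l
  induction l using chunk4.induct with
  | case1 a b c d rest ih =>
    intro j hj
    have hlen : (a :: b :: c :: d :: rest).length / 4 = rest.length / 4 + 1 := by
      simp; omega
    rw [hlen, PySem.List.pyRange_one_cons (by push_cast; omega), List.map_cons]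
    have hhead : PySem.List.slice full (some (4 * (j : Int))) (some (4 * (j : Int) + 4)) =
        [a, b, c, d] := by
      have h4 : (4 * (j : Int)) = ((4 * j : Nat) : Int) := by push_cast; ring
      have h4' : (4 * (j : Int) + 4) = ((4 * j : Nat) : Int) + ((4 : Nat) : Int) := by
        push_cast; ring
      rw [h4', h4, PySem.List.slice_natCast_add, ← hj]
      simp
    have htail : rest = full.drop (4 * (j + 1)) := by
      have : full.drop (4 * (j + 1)) = (full.drop (4 * j)).drop 4 := by
        rw [List.drop_drop]; ring_nf
      rw [this, ← hj]
      simp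
    have hb : ((j : Int) + ((rest.length / 4 + 1 : Nat) : Int)) =
        (((j + 1 : Nat)) : Int) + ((rest.length / 4 : Nat) : Int) := by push_cast; ring
    have hs : ((j : Int) + 1) = (((j + 1 : Nat)) : Int) := by push_cast; ring
    rw [hhead, hb, hs, ih (j + 1) htail, chunk4]
  | case2 l h =>
    intro j hj
    match l, h with
    | [], _ => simp [PySem.List.pyRange_one_eq_nil, chunk4]
    | [a], _ => simp [PySem.List.pyRange_one_eq_nil, chunk4]
    | [a, b], _ => simp [PySem.List.pyRange_one_eq_nil, chunk4]
    | [a, b, c], _ => simp [PySem.List.pyRange_one_eq_nil, chunk4]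
    | a :: b :: c :: d :: r, h => exact (h a b c d r rfl).elim

-- ===== VERDICT (by name: the statement is the Claim_ definition above) =====
theorem makeEstrofas_spec : Claim_equal_makeEstrofas := by
  intro xs _
  unfold Spec_makeEstrofas makeEstrofas makeEstrofas_alt
  rw [loopA_eq_loopAbs xs xs.length 1 (by omega), loopAbs_one_eq_chunk4]
  simp only []
  have hfd : PySem.Int.floordiv (((PySem.List.slice xs (some 1) none).length : Nat) : Int) 4 =
      (((PySem.List.slice xs (some 1) none).length / 4 : Nat) : Int) := by
    exact_mod_cast PySem.Int.floordiv_natCast (PySem.List.slice xs (some 1) none).length 4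
  rw [hfd]
  have := mapRange_eq_chunk4 (PySem.List.slice xs (some 1) none)
    (PySem.List.slice xs (some 1) none) 0 (by simp)
  simp only [Nat.cast_zero, zero_add] at this
  rw [this]
  have h1 : PySem.List.slice xs (some 1) none = xs.drop 1 := by
    have := PySem.List.slice_from_natCast xs 1
    simp only [show ((1:Nat):Int) = (1:Int) by norm_num] at this
    exact this
  rw [h1]
  simp
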